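-- pv_equiv track=rewrite | github.com/meghnak2001/python | howManyunsetBits.py | unset
-- ===== SOURCE A (Python) =====
-- def unset(n):
--     c=0
--     while n>0:
--         d=n%2 # or d=n&1
--         if d==0:
--             c+=1
--         n=n//2 # or n=n>>1
--     return c
-- ===== SOURCE B (Python) =====
-- def unset(n):
--     m = max(0, n)
--     return m.bit_length() - bin(m).count('1')
-- ===== Notes on version B (the rewrite author's own statement) =====
-- stated objective: idiomatic
-- what changed: Replaces the per-bit division loop and counter with a closed decomposition: bit_length of the clamped input minus its popcount.
import Mathlib
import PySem

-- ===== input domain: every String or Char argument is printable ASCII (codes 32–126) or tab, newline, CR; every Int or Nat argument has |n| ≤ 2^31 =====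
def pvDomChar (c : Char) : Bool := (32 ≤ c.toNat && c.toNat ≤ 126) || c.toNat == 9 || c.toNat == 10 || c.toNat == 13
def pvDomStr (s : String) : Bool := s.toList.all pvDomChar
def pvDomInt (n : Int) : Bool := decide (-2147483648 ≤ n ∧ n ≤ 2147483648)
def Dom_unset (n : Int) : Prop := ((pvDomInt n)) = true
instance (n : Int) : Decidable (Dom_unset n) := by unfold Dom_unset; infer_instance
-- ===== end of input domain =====

-- B replaces the per-bit loop with bit_length minus popcount of the clamped input (idiomatic).

-- ===== PORT A =====
-- the while loop of A, state (n, c)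
def unsetGo (n c : Int) : Int :=
  if _h : n > 0 then
    unsetGo (PySem.Int.floordiv n 2)
      (if PySem.Int.mod n 2 = 0 then c + 1 else c)
  else c
termination_by n.toNat
decreasing_by
  rw [PySem.Int.floordiv_eq_ediv_of_pos (by omega : (0:Int) < 2)]
  omega

def unset (n : Int) : Int := unsetGo n 0

-- ===== PORT B =====
def unset_alt (n : Int) : Int :=
  let m := max 0 n
  (PySem.Int.bitLength m : Int) - (PySem.Int.bitCount m : Int)

-- ===== PRECONDITION & SPEC =====
def Spec_unset (n : Int) (out : Int) : Prop := out = unset_alt n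
instance (n : Int) (out : Int) : Decidable (Spec_unset n out) := by unfold Spec_unset; infer_instance

-- ===== CLAIM (what is proved, stated in full; the proofs are below) =====
def Claim_equal_unset : Prop := ∀ (n : Int), Dom_unset n → Spec_unset n (unset n)

-- ===== LEMMAS AND PROOFS =====
theorem unsetGo_eq (n c : Int) :
    unsetGo n c =
      c + ((PySem.Int.bitLength (max 0 n) : Int) - (PySem.Int.bitCount (max 0 n) : Int)) := by
  induction n, c using unsetGo.induct with
  | case1 n c h ih =>
    rw [unsetGo]
    simp only [h, dite_true]
    simp only [dite_eq_ite] at ih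
    rw [ih]
    have hfd : 0 ≤ PySem.Int.floordiv n 2 := by
      rw [PySem.Int.floordiv_eq_ediv_of_pos (by omega : (0:Int) < 2)]; omega
    have hmaxn : max 0 n = n := by omega
    have hmaxf : max 0 (PySem.Int.floordiv n 2) = PySem.Int.floordiv n 2 := by omega
    rw [hmaxn, hmaxf, PySem.Int.bitLength_of_pos h, PySem.Int.bitCount_of_pos h]
    have hm := PySem.Int.mod_nonneg n (by omega : (0:Int) < 2)
    have hm2 := PySem.Int.mod_lt n (by omega : (0:Int) < 2)
    by_cases h0 : PySem.Int.mod n 2 = 0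
    · simp only [h0, if_true]
      push_cast
      omega
    · simp only [h0, if_false]
      have : PySem.Int.mod n 2 = 1 := by omega
      rw [this]
      push_cast
      omega
  | case2 n c h =>
    rw [unsetGo]
    simp only [h, dite_false]
    have : max 0 n = 0 := by omega
    rw [this]
    simp [PySem.Int.bitLength_zero, PySem.Int.bitCount_zero]

-- ===== VERDICT (by name: the statement is the Claim_ definition above) =====
theorem unset_spec : Claim_equal_unset := by
  intro n _
  unfold Spec_unset unset unset_alt
  rw [unsetGo_eq]
  ring
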